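-- pv_equiv track=rewrite | github.com/Leon-Sander/HoVerClaimDecomp | cross_encoding.py | postprocess_decomposed_claims
-- ===== SOURCE A (Python) =====
-- def postprocess_decomposed_claims(decomposed_claims : str) -> list[str]:
--     output = []
--     decomposed_claims = decomposed_claims.replace("\n\n", "\n").split("\n")
--     for claim in decomposed_claims:
--         if claim == "":
--             continue
--         output.append(claim.lstrip())
--     return output
-- ===== SOURCE B (Python) =====
-- import re
--
-- def postprocess_decomposed_claims(decomposed_claims: str) -> list[str]:
--     return [t.lstrip() for t in re.findall(r"[^\n]+", decomposed_claims)]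
-- ===== Notes on version B (the rewrite author's own statement) =====
-- stated objective: idiomatic
-- what changed: Replaces A's newline-pair collapse, split-on-newline and skip-empty-piece loop by a single regex scan that extracts the maximal non-newline runs (empty lines yield no token) and lstrips each token.
import Mathlib
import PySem

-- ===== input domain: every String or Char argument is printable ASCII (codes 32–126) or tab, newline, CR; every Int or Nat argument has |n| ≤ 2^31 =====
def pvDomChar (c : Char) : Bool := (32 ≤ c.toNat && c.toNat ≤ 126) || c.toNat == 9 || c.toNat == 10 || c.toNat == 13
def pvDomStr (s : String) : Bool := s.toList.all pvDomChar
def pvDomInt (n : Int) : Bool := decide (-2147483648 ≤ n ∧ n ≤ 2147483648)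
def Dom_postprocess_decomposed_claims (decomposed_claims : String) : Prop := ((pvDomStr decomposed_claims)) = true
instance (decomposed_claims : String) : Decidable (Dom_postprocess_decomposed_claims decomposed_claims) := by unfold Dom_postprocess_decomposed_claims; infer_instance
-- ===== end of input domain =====

-- B replaces A's replace+split+skip-empty loop by a single regex-style scan extracting
-- maximal non-newline runs, then lstrips each token (objective: idiomatic; same cost).

-- ===== PORT A =====
def postprocess_decomposed_claims (decomposed_claims : String) : List String :=
  -- decomposed_claims.replace("\n\n","\n").split("\n"); sep "\n" ≠ "" so split? is always some
  let parts := (PySem.Str.split? (PySem.Str.replace decomposed_claims "\n\n" "\n") "\n").getD []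
  parts.foldl (fun output claim => if claim == "" then output else output ++ [PySem.Str.lstrip claim]) []

-- ===== PORT B =====
-- the character class [^\n] of B's regex
def pvNotNl (c : Char) : Bool := c ≠ '\n'

-- re.findall(r"[^\n]+", s): the maximal runs of non-newline characters, in order (hand port, exact)
def pvRuns : List Char → List (List Char)
  | [] => []
  | c :: rest =>
    if c = '\n' then pvRuns rest
    else (c :: rest.takeWhile pvNotNl) :: pvRuns (rest.dropWhile pvNotNl)
termination_by l => l.length
decreasing_by
  · simp
  · have := List.length_dropWhile_le pvNotNl rest
    simp; omega

def postprocess_decomposed_claims_alt (decomposed_claims : String) : List String :=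
  (pvRuns decomposed_claims.toList).map (fun t => String.ofList (PySem.Chars.lstrip t))

-- ===== PRECONDITION & SPEC =====
def Spec_postprocess_decomposed_claims (decomposed_claims : String) (out : List String) : Prop := out = postprocess_decomposed_claims_alt decomposed_claims
instance (decomposed_claims : String) (out : List String) : Decidable (Spec_postprocess_decomposed_claims decomposed_claims out) := by unfold Spec_postprocess_decomposed_claims; infer_instance

-- ===== CLAIM (what is proved, stated in full; the proofs are below) =====
def Claim_equal_postprocess_decomposed_claims : Prop := ∀ (decomposed_claims : String), Dom_postprocess_decomposed_claims decomposed_claims → Spec_postprocess_decomposed_claims decomposed_claims (postprocess_decomposed_claims decomposed_claims)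

-- ===== LEMMAS AND PROOFS =====

-- reference form of replace(s, "\n\n", "\n")
def pvRepl : List Char → List Char
  | [] => []
  | [c] => [c]
  | a :: b :: rest => if a = '\n' ∧ b = '\n' then '\n' :: pvRepl rest else a :: pvRepl (b :: rest)

-- reference form of split("\n") with accumulated current piece `pre`
def pvSplitN (pre : List Char) : List Char → List (List Char)
  | [] => [pre]
  | c :: rest => if c = '\n' then pre :: pvSplitN [] rest else pvSplitN (pre ++ [c]) rest

lemma pvNotNl_nl : pvNotNl '\n' = false := rfl

lemma pvNotNl_of_ne {c : Char} (h : c ≠ '\n') : pvNotNl c = true := by simp [pvNotNl, h]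

lemma pvRepl_cons_ne (a : Char) (l : List Char) (h : a ≠ '\n') :
    pvRepl (a :: l) = a :: pvRepl l := by
  cases l with
  | nil => rfl
  | cons b r => simp [pvRepl, h]

lemma pvRepl_head_nl (l : List Char) : ∃ z, pvRepl ('\n' :: l) = '\n' :: z := by
  cases l with
  | nil => exact ⟨[], rfl⟩
  | cons b r =>
    by_cases hb : b = '\n'
    · subst hb; exact ⟨pvRepl r, by simp [pvRepl]⟩
    · exact ⟨pvRepl (b :: r), by simp [pvRepl, hb]⟩

lemma replace_go_spec (fuel : Nat) (l acc : List Char) (h : l.length ≤ fuel) :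
    PySem.Chars.replace.go ['\n', '\n'] ['\n'] fuel l acc = acc.reverse ++ pvRepl l := by
  induction fuel generalizing l acc with
  | zero =>
    have : l = [] := by cases l <;> simp_all
    subst this; simp [PySem.Chars.replace.go, pvRepl]
  | succ fuel ih =>
    cases l with
    | nil => simp [PySem.Chars.replace.go, pvRepl]
    | cons c t =>
      rw [PySem.Chars.replace.go]
      simp only [List.length_cons] at h
      by_cases hp : List.isPrefixOf ['\n', '\n'] (c :: t)
      · rw [if_pos hp]
        cases t with
        | nil => simp [List.isPrefixOf] at hp
        | cons b r =>
          rw [List.isPrefixOf_iff_prefix] at hp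
          obtain ⟨u, hu⟩ := hp
          simp only [List.cons_append, List.nil_append] at hu
          injection hu with hc hu2
          injection hu2 with hb hu3
          subst hc; subst hb
          have hd : List.drop (['\n', '\n'].length) ('\n' :: '\n' :: r) = r := rfl
          rw [hd, ih r _ (by simp at h; omega)]
          rw [show pvRepl ('\n' :: '\n' :: r) = '\n' :: pvRepl r from by simp [pvRepl]]
          simp
      · rw [if_neg hp]
        have hdrop : pvRepl (c :: t) = c :: pvRepl t := by
          by_cases hc : c = '\n'
          · subst hc
            cases t with
            | nil => rfl
            | cons b r =>
              have hb : b ≠ '\n' := by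
                intro hb; subst hb; simp [List.isPrefixOf] at hp
              simp [pvRepl, hb]
          · exact pvRepl_cons_ne c t hc
        rw [ih t _ (by omega)]
        rw [hdrop]; simp

lemma chars_replace_eq (l : List Char) :
    PySem.Chars.replace l ['\n', '\n'] ['\n'] = pvRepl l := by
  rw [PySem.Chars.replace]
  simpa using replace_go_spec l.length l [] (le_refl _)

lemma splitOn_go_spec (fuel : Nat) (l cur : List Char) (accs : List (List Char))
    (h : l.length ≤ fuel) :
    PySem.Chars.splitOn.go ['\n'] fuel l cur accs = accs.reverse ++ pvSplitN cur.reverse l := by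
  induction fuel generalizing l cur accs with
  | zero =>
    have : l = [] := by cases l <;> simp_all
    subst this; simp [PySem.Chars.splitOn.go, pvSplitN]
  | succ fuel ih =>
    cases l with
    | nil => simp [PySem.Chars.splitOn.go, pvSplitN]
    | cons c t =>
      rw [PySem.Chars.splitOn.go]
      simp only [List.length_cons] at h
      by_cases hc : c = '\n'
      · subst hc
        rw [if_pos (by simp [List.isPrefixOf])]
        have hd : List.drop (['\n'].length) ('\n' :: t) = t := rfl
        rw [hd, ih t [] _ (by omega)]
        simp [pvSplitN]
      · rw [if_neg (by simp [List.isPrefixOf]; exact Ne.symm hc)]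
        rw [ih t (c :: cur) _ (by omega)]
        simp [pvSplitN, hc]

lemma chars_splitOn_eq (l : List Char) :
    PySem.Chars.splitOn l ['\n'] = pvSplitN [] l := by
  rw [PySem.Chars.splitOn]
  simpa using splitOn_go_spec (l.length + 1) l [] [] (by omega)

lemma filter_pvSplitN (l : List Char) : ∀ pre,
    (pvSplitN pre l).filter (fun x => !x.isEmpty) =
      if pre = [] then pvRuns l
      else (pre ++ l.takeWhile pvNotNl) :: pvRuns (l.dropWhile pvNotNl) := by
  induction l with
  | nil =>
    intro pre
    by_cases hp : pre = [] <;> simp [pvSplitN, pvRuns, hp, List.filter]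
  | cons c rest ih =>
    intro pre
    by_cases hc : c = '\n'
    · subst hc
      rw [show pvSplitN pre ('\n' :: rest) = pre :: pvSplitN [] rest from by simp [pvSplitN]]
      rw [List.filter_cons, ih [], if_pos rfl]
      by_cases hp : pre = []
      · subst hp
        simp [pvRuns]
      · rw [if_neg hp]
        rw [show List.takeWhile pvNotNl ('\n' :: rest) = [] from by simp [List.takeWhile, pvNotNl_nl]]
        rw [show List.dropWhile pvNotNl ('\n' :: rest) = '\n' :: rest from by simp [List.dropWhile, pvNotNl_nl]]
        rw [show pvRuns ('\n' :: rest) = pvRuns rest from by rw [pvRuns, if_pos rfl]]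
        simp [hp]
    · rw [show pvSplitN pre (c :: rest) = pvSplitN (pre ++ [c]) rest from by simp [pvSplitN, hc]]
      rw [ih (pre ++ [c]), if_neg (by simp)]
      rw [show List.takeWhile pvNotNl (c :: rest) = c :: List.takeWhile pvNotNl rest from by
        simp [List.takeWhile, pvNotNl_of_ne hc]]
      rw [show List.dropWhile pvNotNl (c :: rest) = List.dropWhile pvNotNl rest from by
        simp [List.dropWhile, pvNotNl_of_ne hc]]
      by_cases hp : pre = []
      · subst hp
        rw [if_pos rfl]
        rw [show pvRuns (c :: rest) = (c :: rest.takeWhile pvNotNl) :: pvRuns (rest.dropWhile pvNotNl) from by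
          rw [pvRuns, if_neg hc]]
        simp
      · rw [if_neg hp]
        simp

lemma takeWhile_pvRepl (l : List Char) :
    (pvRepl l).takeWhile pvNotNl = l.takeWhile pvNotNl := by
  induction l with
  | nil => rfl
  | cons a rest ih =>
    by_cases ha : a = '\n'
    · subst ha
      obtain ⟨z, hz⟩ := pvRepl_head_nl rest
      rw [hz]
      simp [List.takeWhile, pvNotNl_nl]
    · rw [pvRepl_cons_ne a rest ha]
      simp [List.takeWhile, pvNotNl_of_ne ha, ih]

lemma dropWhile_pvRepl (l : List Char) :
    (pvRepl l).dropWhile pvNotNl = pvRepl (l.dropWhile pvNotNl) := by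
  induction l with
  | nil => rfl
  | cons a rest ih =>
    by_cases ha : a = '\n'
    · subst ha
      obtain ⟨z, hz⟩ := pvRepl_head_nl rest
      rw [show List.dropWhile pvNotNl ('\n' :: rest) = '\n' :: rest from by
        simp [List.dropWhile, pvNotNl_nl]]
      rw [hz]
      simp [List.dropWhile, pvNotNl_nl]
    · rw [pvRepl_cons_ne a rest ha]
      rw [show List.dropWhile pvNotNl (a :: rest) = List.dropWhile pvNotNl rest from by
        simp [List.dropWhile, pvNotNl_of_ne ha]]
      rw [show List.dropWhile pvNotNl (a :: pvRepl rest) = List.dropWhile pvNotNl (pvRepl rest) from by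
        simp [List.dropWhile, pvNotNl_of_ne ha]]
      exact ih

lemma pvRuns_pvRepl (l : List Char) : pvRuns (pvRepl l) = pvRuns l := by
  match l with
  | [] => rfl
  | a :: rest =>
    by_cases ha : a = '\n'
    · subst ha
      match rest with
      | [] => rfl
      | b :: r2 =>
        by_cases hb : b = '\n'
        · subst hb
          have hrec := pvRuns_pvRepl r2
          rw [show pvRepl ('\n' :: '\n' :: r2) = '\n' :: pvRepl r2 from by simp [pvRepl]]
          rw [show pvRuns ('\n' :: pvRepl r2) = pvRuns (pvRepl r2) from by rw [pvRuns, if_pos rfl]]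
          rw [show pvRuns ('\n' :: '\n' :: r2) = pvRuns r2 from by
            rw [pvRuns, if_pos rfl, pvRuns, if_pos rfl]]
          exact hrec
        · have hrec := pvRuns_pvRepl (b :: r2)
          rw [show pvRepl ('\n' :: b :: r2) = '\n' :: pvRepl (b :: r2) from by simp [pvRepl, hb]]
          rw [show pvRuns ('\n' :: pvRepl (b :: r2)) = pvRuns (pvRepl (b :: r2)) from by
            rw [pvRuns, if_pos rfl]]
          rw [show pvRuns ('\n' :: b :: r2) = pvRuns (b :: r2) from by rw [pvRuns, if_pos rfl]]
          exact hrec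
    · have hrec := pvRuns_pvRepl (rest.dropWhile pvNotNl)
      rw [pvRepl_cons_ne a rest ha]
      rw [pvRuns, pvRuns, if_neg ha, if_neg ha]
      rw [takeWhile_pvRepl, dropWhile_pvRepl, hrec]
termination_by l.length
decreasing_by
  · simp
  · simp
  · have := List.length_dropWhile_le pvNotNl rest
    simp; omega

lemma foldl_skip_empty (parts : List String) :
    parts.foldl (fun output claim => if claim == "" then output else output ++ [PySem.Str.lstrip claim]) [] =
      (parts.filter (fun c => !(c == ""))).map PySem.Str.lstrip := by
  have h1 : parts.foldl
      (fun output claim => if claim == "" then output else output ++ [PySem.Str.lstrip claim]) [] =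
      parts.foldl
      (fun output claim => if (!(claim == "")) = true then output ++ [PySem.Str.lstrip claim] else output) [] :=
    PySem.List.foldl_congr_mem _ _ _ []
      (by intro acc x _; by_cases hx : x = "" <;> simp [hx])
  rw [h1]
  simpa using PySem.List.foldl_append_if (fun c => !(c == "")) PySem.Str.lstrip parts []

lemma ofList_beq_empty (c : List Char) : (String.ofList c == "") = c.isEmpty := by
  cases hc : c.isEmpty
  · simp only [beq_eq_false_iff_ne, ne_eq]
    intro h
    have := congrArg String.toList h
    simp at this
    simp [this] at hc
  · simp only [List.isEmpty_iff] at hc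
    subst hc; rfl

-- ===== VERDICT (by name: the statement is the Claim_ definition above) =====
theorem postprocess_decomposed_claims_spec : Claim_equal_postprocess_decomposed_claims := by
  intro s _
  unfold Spec_postprocess_decomposed_claims
  unfold postprocess_decomposed_claims postprocess_decomposed_claims_alt
  rw [foldl_skip_empty]
  have hrep : PySem.Str.replace s "\n\n" "\n" = String.ofList (pvRepl s.toList) := by
    rw [PySem.Str.replace]
    congr 1
    simpa using chars_replace_eq s.toList
  rw [hrep, PySem.Str.split?]
  rw [show (String.ofList (pvRepl s.toList)).toList = pvRepl s.toList from String.toList_ofList]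
  rw [show ("\n" : String).toList = ['\n'] from rfl]
  rw [PySem.Chars.split?, if_neg (by simp), chars_splitOn_eq]
  simp only [Option.map_some, Option.getD_some]
  rw [List.filter_map]
  have hpred : ((fun c => !(c == "")) ∘ String.ofList) = fun (c : List Char) => !c.isEmpty := by
    funext c; simp [Function.comp, ofList_beq_empty]
  rw [hpred, filter_pvSplitN, if_pos rfl, pvRuns_pvRepl]
  rw [List.map_map]
  apply List.map_congr_left
  intro t _
  simp [PySem.Str.lstrip, Function.comp]
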